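-- pv_equiv track=rewrite | github.com/medvedevgroup/mutation-rate-intervals | simulate_nucleotide_errors.py | count_mutated_kmers_linear
-- ===== SOURCE A (Python) =====
-- def count_mutated_kmers_linear(seq,mutatedSeq,kmerSize):
-- 	assert (len(seq) == len(mutatedSeq))
-- 	assert (len(seq) >= kmerSize)
-- 	numKmers = len(seq) - (kmerSize-1)
-- 	nMutated = 0
-- 	for pos in range(numKmers):
-- 		sKmer = seq[pos:pos+kmerSize]
-- 		if (not is_valid_kmer(sKmer)): continue
-- 		if (sKmer != mutatedSeq[pos:pos+kmerSize]):
-- 			nMutated += 1       # pos is 'mutated'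
-- 	return nMutated
--
-- def is_valid_kmer(seq):
-- 	validCount = sum([(nt in "ACGTacgt") for nt in seq])
-- 	return (validCount == len(seq))
-- ===== SOURCE B (Python) =====
-- def count_mutated_kmers_linear(seq, mutatedSeq, kmerSize):
-- 	assert (len(seq) == len(mutatedSeq))
-- 	assert (len(seq) >= kmerSize)
-- 	# prefix sums: inv[i] = invalid chars in seq[:i], mm[i] = mismatches in seq[:i] vs mutatedSeq[:i]
-- 	inv = [0]
-- 	mm = [0]
-- 	ci = 0
-- 	cm = 0
-- 	for a, b in zip(seq, mutatedSeq):
-- 		ci += (a not in "ACGTacgt")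
-- 		cm += (a != b)
-- 		inv.append(ci)
-- 		mm.append(cm)
-- 	nMutated = 0
-- 	for pos in range(len(seq) - (kmerSize - 1)):
-- 		e = pos + kmerSize
-- 		if inv[e] - inv[pos] == 0 and mm[e] - mm[pos] > 0:
-- 			nMutated += 1
-- 	return nMutated
-- ===== Notes on version B (the rewrite author's own statement) =====
-- stated objective: faster
-- what changed: Replaces the per-position k-character slice/scan (O(n*k)) by one pass building prefix sums of invalid-char and mismatch counts, answering each window in O(1).
-- outside the precondition, e.g. on count_mutated_kmers_linear('A', 'C', -1): A returns 0, B raises IndexError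
import Mathlib
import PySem

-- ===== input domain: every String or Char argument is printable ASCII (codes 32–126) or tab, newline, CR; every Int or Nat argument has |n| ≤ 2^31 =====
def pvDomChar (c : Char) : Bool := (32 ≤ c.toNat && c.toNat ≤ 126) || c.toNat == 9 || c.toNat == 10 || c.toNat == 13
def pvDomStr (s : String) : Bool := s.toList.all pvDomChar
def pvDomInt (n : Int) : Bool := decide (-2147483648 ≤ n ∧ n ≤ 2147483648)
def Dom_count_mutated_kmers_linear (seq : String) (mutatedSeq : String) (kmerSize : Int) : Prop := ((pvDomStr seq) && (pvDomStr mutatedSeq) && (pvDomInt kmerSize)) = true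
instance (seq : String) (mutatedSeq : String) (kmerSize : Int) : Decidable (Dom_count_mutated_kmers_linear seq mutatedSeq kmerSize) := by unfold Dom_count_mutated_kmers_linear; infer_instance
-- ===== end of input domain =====

-- B replaces A's per-window k-character rescans by one pass of prefix sums (O(n) vs O(n*k)).

-- shared literal: `nt in "ACGTacgt"` (Python membership of a char in a string literal)
def nucl (nt : Char) : Bool := "ACGTacgt".toList.contains nt

-- ===== PORT A =====
-- is_valid_kmer: sum([(nt in "ACGTacgt") for nt in seq]) == len(seq)
def is_valid_kmer (cs : List Char) : Bool :=
  ((cs.map (fun nt => if nucl nt then (1 : Int) else 0)).sum == (cs.length : Int))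

def count_mutated_kmers_linear (seq : String) (mutatedSeq : String) (kmerSize : Int) : Int :=
  -- the two asserts are Pre_ conditions
  let s := seq.toList
  let t := mutatedSeq.toList
  let numKmers : Int := (s.length : Int) - (kmerSize - 1)
  (PySem.List.pyRange 0 numKmers 1).foldl (fun nMutated pos =>
    let sKmer := PySem.List.slice s (some pos) (some (pos + kmerSize))
    if ¬ is_valid_kmer sKmer then nMutated
    else if sKmer ≠ PySem.List.slice t (some pos) (some (pos + kmerSize)) then nMutated + 1
    else nMutated) 0

-- ===== PORT B =====
-- one pass over zip(seq, mutatedSeq) building prefix arrays inv/mm with running totals ci/cm,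
-- then O(1) window queries; list indexing inv[e] is in range under Pre_, ported as pyGetD.
def count_mutated_kmers_linear_alt (seq : String) (mutatedSeq : String) (kmerSize : Int) : Int :=
  let s := seq.toList
  let t := mutatedSeq.toList
  let st := (s.zip t).foldl
    (fun (st : (List Int × Int) × (List Int × Int)) p =>
      ((st.1.1 ++ [st.1.2 + (if nucl p.1 then 0 else 1)], st.1.2 + (if nucl p.1 then 0 else 1)),
       (st.2.1 ++ [st.2.2 + (if p.1 ≠ p.2 then 1 else 0)], st.2.2 + (if p.1 ≠ p.2 then 1 else 0))))
    (([0], 0), ([0], 0))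
  let inv := st.1.1
  let mm := st.2.1
  (PySem.List.pyRange 0 ((s.length : Int) - (kmerSize - 1)) 1).foldl (fun nMutated pos =>
    let e := pos + kmerSize
    if PySem.List.pyGetD inv e 0 - PySem.List.pyGetD inv pos 0 = 0 ∧
       PySem.List.pyGetD mm e 0 - PySem.List.pyGetD mm pos 0 > 0 then nMutated + 1
    else nMutated) 0

-- ===== PRECONDITION & SPEC =====
-- Pre_ excludes the inputs where A's asserts raise (unequal lengths, kmerSize > len) and,
-- additionally, negative kmerSize: there A returns 0 by comparing empty slices while B's
-- prefix-array indexing raises IndexError.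
def Pre_count_mutated_kmers_linear (seq : String) (mutatedSeq : String) (kmerSize : Int) : Prop :=
  seq.toList.length = mutatedSeq.toList.length ∧ 0 ≤ kmerSize ∧ kmerSize ≤ (seq.toList.length : Int)
instance (seq : String) (mutatedSeq : String) (kmerSize : Int) : Decidable (Pre_count_mutated_kmers_linear seq mutatedSeq kmerSize) := by unfold Pre_count_mutated_kmers_linear; infer_instance

def pvWitness_count_mutated_kmers_linear : String × String × Int := ("ACGT", "AGGT", 2)

def Spec_count_mutated_kmers_linear (seq : String) (mutatedSeq : String) (kmerSize : Int) (out : Int) : Prop := out = count_mutated_kmers_linear_alt seq mutatedSeq kmerSize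
instance (seq : String) (mutatedSeq : String) (kmerSize : Int) (out : Int) : Decidable (Spec_count_mutated_kmers_linear seq mutatedSeq kmerSize out) := by unfold Spec_count_mutated_kmers_linear; infer_instance

-- ===== CLAIM (what is proved, stated in full; the proofs are below) =====
def Claim_equal_count_mutated_kmers_linear : Prop := ∀ (seq : String) (mutatedSeq : String) (kmerSize : Int), Dom_count_mutated_kmers_linear seq mutatedSeq kmerSize → Pre_count_mutated_kmers_linear seq mutatedSeq kmerSize → Spec_count_mutated_kmers_linear seq mutatedSeq kmerSize (count_mutated_kmers_linear seq mutatedSeq kmerSize)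

-- ===== LEMMAS AND PROOFS =====

-- MAIN STRUCTURE OF THE PROOF: B's builder fold is two prefix-sum folds (foldl_prefix via
-- foldl_prod_mk); each window query then equals A's slice test, pointwise over the range
-- (foldl_congr_mem).

-- the prefix-building fold, one accumulator at a time
theorem foldl_prefix {α : Type} (g : α → Int) (ps : List α) :
    ps.foldl (fun (st : List Int × Int) x => (st.1 ++ [st.2 + g x], st.2 + g x)) ([0], 0)
      = ((List.range (ps.length + 1)).map (fun i => ((ps.take i).map g).sum), (ps.map g).sum) := by
  induction ps using List.reverseRecOn with
  | nil => simp
  | append_singleton ps x ih =>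
    rw [List.foldl_append, ih]
    simp only [List.foldl_cons, List.foldl_nil, List.length_append, List.length_singleton]
    simp only [Prod.mk.injEq]
    constructor
    · conv_rhs => rw [List.range_succ]
      rw [List.map_append]
      congr 1
      · apply List.map_congr_left
        intro i hi
        rw [List.mem_range] at hi
        rw [List.take_append_of_le_length (by omega)]
      · simp
    · simp

-- reading a prefix array at a nonnegative in-range index
theorem pyGetD_prefix {α : Type} (g : α → Int) (ps : List α) (j : Int)
    (h0 : 0 ≤ j) (hj : j ≤ (ps.length : Int)) :
    PySem.List.pyGetD ((List.range (ps.length + 1)).map (fun i => ((ps.take i).map g).sum)) j 0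
      = ((ps.take j.toNat).map g).sum := by
  rw [PySem.List.pyGetD_of_nonneg _ _ h0]
  rw [PySem.List.getD_map_range _ _ _ _ (by omega)]

-- difference of consecutive prefixes is the window sum
theorem prefix_window {α : Type} (g : α → Int) (ps : List α) (p k : ℕ) :
    ((ps.take (p + k)).map g).sum - ((ps.take p).map g).sum = (((ps.drop p).take k).map g).sum := by
  rw [List.take_add, List.map_append, List.sum_append]
  ring

-- indicator and co-indicator sums add to the length
theorem ind_inv_sum (w : List Char) :
    (w.map (fun nt => if nucl nt then (1:Int) else 0)).sum
      + (w.map (fun c => if nucl c then (0:Int) else 1)).sum = (w.length : Int) := by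
  induction w with
  | nil => simp
  | cons c cs ih =>
    simp only [List.map_cons, List.sum_cons, List.length_cons]
    by_cases h : nucl c <;> simp only [h] <;> push_cast <;> omega

-- validity ⇔ zero invalid characters in the window
theorem valid_iff_zero (w : List Char) :
    is_valid_kmer w = true ↔ ((w.map (fun c => if nucl c then (0:Int) else 1)).sum = 0) := by
  have key := ind_inv_sum w
  simp only [is_valid_kmer, beq_iff_eq]
  omega

-- mismatch indicator sums are nonnegative
theorem mm_nonneg (l : List (Char × Char)) :
    (0:Int) ≤ (l.map (fun p => if p.1 ≠ p.2 then (1:Int) else 0)).sum := by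
  apply List.sum_nonneg
  intro x hx
  simp only [List.mem_map] at hx
  obtain ⟨p, -, rfl⟩ := hx
  split <;> omega

-- equality of same-length lists ⇔ zero mismatches over their zip
theorem eq_iff_zero_mm (a b : List Char) (h : a.length = b.length) :
    a = b ↔ (((a.zip b).map (fun p => if p.1 ≠ p.2 then (1:Int) else 0)).sum = 0) := by
  induction a generalizing b with
  | nil => cases b <;> simp_all
  | cons x xs ih =>
    cases b with
    | nil => simp_all
    | cons y ys =>
      simp only [List.zip_cons_cons, List.map_cons, List.sum_cons, List.cons.injEq]
      have hs := mm_nonneg (xs.zip ys)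
      rw [ih ys (by simpa using h)]
      split_ifs with hxy
      · constructor
        · rintro ⟨rfl, -⟩; exact absurd rfl hxy
        · intro hc; omega
      · constructor
        · rintro ⟨-, hc⟩; omega
        · intro hc; exact ⟨by simpa using hxy, by omega⟩

theorem main_eq (seq mutatedSeq : String) (kmerSize : Int)
    (hlen : seq.toList.length = mutatedSeq.toList.length)
    (hk0 : 0 ≤ kmerSize) (hkn : kmerSize ≤ (seq.toList.length : Int)) :
    count_mutated_kmers_linear seq mutatedSeq kmerSize
      = count_mutated_kmers_linear_alt seq mutatedSeq kmerSize := by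
  unfold count_mutated_kmers_linear count_mutated_kmers_linear_alt
  dsimp only
  rw [PySem.List.foldl_prod_mk
    (f := fun (a : List Int × Int) (p : Char × Char) =>
      (a.1 ++ [a.2 + (if nucl p.1 then (0:Int) else 1)], a.2 + (if nucl p.1 then (0:Int) else 1)))
    (g := fun (a : List Int × Int) (p : Char × Char) =>
      (a.1 ++ [a.2 + (if p.1 ≠ p.2 then (1:Int) else 0)], a.2 + (if p.1 ≠ p.2 then (1:Int) else 0)))]
  rw [foldl_prefix (g := fun (p : Char × Char) => if nucl p.1 then (0:Int) else 1),
      foldl_prefix (g := fun (p : Char × Char) => if p.1 ≠ p.2 then (1:Int) else 0)]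
  apply PySem.List.foldl_congr_mem
  intro acc pos hpos
  rw [PySem.List.mem_pyRange_one] at hpos
  obtain ⟨hp0, hplt⟩ := hpos
  set s := seq.toList with hs
  set t := mutatedSeq.toList with ht
  have hzlen : (s.zip t).length = s.length := by
    rw [List.length_zip, hlen, min_self]
  have hpk0 : 0 ≤ pos + kmerSize := by omega
  have hpkn : pos + kmerSize ≤ (s.length : Int) := by omega
  -- slices on the A side
  rw [PySem.List.slice_toNat _ hp0 hpk0, PySem.List.slice_toNat _ hp0 hpk0]
  -- prefix reads on the B side
  dsimp only
  have hzk : pos + kmerSize ≤ ((s.zip t).length : Int) := by rw [hzlen]; omega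
  have hzp : pos ≤ ((s.zip t).length : Int) := by rw [hzlen]; omega
  rw [pyGetD_prefix _ _ _ hpk0 hzk, pyGetD_prefix _ _ _ hp0 hzp,
      pyGetD_prefix _ _ _ hpk0 hzk, pyGetD_prefix _ _ _ hp0 hzp]
  have htn : (pos + kmerSize).toNat = pos.toNat + kmerSize.toNat := by omega
  rw [htn, Nat.add_sub_cancel_left, prefix_window, prefix_window]
  set p := pos.toNat
  set kn := kmerSize.toNat
  -- the zip window is the zip of the two windows
  have hzip : ((s.zip t).drop p).take kn = ((s.drop p).take kn).zip ((t.drop p).take kn) := by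
    simp only [List.zip_eq_zipWith, List.drop_zipWith, List.take_zipWith]
  have hlw : ((s.drop p).take kn).length = kn := by
    rw [List.length_take, List.length_drop]
    omega
  have hlw' : ((t.drop p).take kn).length = kn := by
    rw [List.length_take, List.length_drop]
    omega
  -- the invalid-char sum over the zip window only looks at first components
  have hfst : (((s.zip t).drop p).take kn).map (fun q : Char × Char => if nucl q.1 then (0:Int) else 1)
      = (((s.drop p).take kn).map (fun c => if nucl c then (0:Int) else 1)) := by
    rw [hzip]
    rw [show (fun q : Char × Char => if nucl q.1 then (0:Int) else 1)
          = (fun c : Char => if nucl c then (0:Int) else 1) ∘ Prod.fst from rfl]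
    rw [← List.map_map, List.map_fst_zip (le_of_eq (hlw.trans hlw'.symm))]
  rw [hfst, hzip]
  -- now compare the two step functions
  have hvalid := valid_iff_zero ((s.drop p).take kn)
  have hne := eq_iff_zero_mm ((s.drop p).take kn) ((t.drop p).take kn) (by omega)
  have hnn := mm_nonneg (((s.drop p).take kn).zip ((t.drop p).take kn))
  simp only [ne_eq] at hnn
  simp only [ne_eq, hvalid, hne]
  split_ifs <;> omega

-- ===== VERDICT (by name: the statement is the Claim_ definition above) =====
theorem count_mutated_kmers_linear_spec : Claim_equal_count_mutated_kmers_linear := by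
  intro seq mutatedSeq kmerSize _ hpre
  obtain ⟨h1, h2, h3⟩ := hpre
  exact main_eq seq mutatedSeq kmerSize h1 h2 h3
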